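-- pv_equiv track=rewrite | github.com/Assaker21/advent-of-code | day9.py | FindEndPosition
-- ===== SOURCE A (Python) =====
-- def FindEndPosition(line, steps):
--     steps[0].append(line[-1])
--     steps[1].append(line[0])
--     all_zeros = True
--
--     for i in range(0, len(line)):
--         if(line[i] != 0):
--             all_zeros = False
--             break
--
--     if(all_zeros):
--         return steps
--
--     new_line = []
--     for i in range(0, len(line) - 1):
--         new_line.append(line[i + 1] - line[i])
--
--     return FindEndPosition(new_line, steps)
-- ===== SOURCE B (Python) =====
-- def FindEndPosition(line, steps):
--     # Two-phase: first materialise all finite-difference levels (down to the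
--     # first all-zero level), then extend steps[0]/steps[1] with every level's
--     # last/first element in one pass each.  Mutates steps in place like A.
--     levels = [line]
--     while any(x != 0 for x in line):
--         line = [b - a for a, b in zip(line, line[1:])]
--         levels.append(line)
--     steps[0].extend(lvl[-1] for lvl in levels)
--     steps[1].extend(lvl[0] for lvl in levels)
--     return steps
-- ===== Notes on version B (the rewrite author's own statement) =====
-- stated objective: alternative
-- what changed: Replaces A's tail recursion that interleaves appends with the difference computation by a two-phase loop: first build the list of all finite-difference levels, then extend steps[0]/steps[1] with each level's last/first element in one pass each.
import Mathlib
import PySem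

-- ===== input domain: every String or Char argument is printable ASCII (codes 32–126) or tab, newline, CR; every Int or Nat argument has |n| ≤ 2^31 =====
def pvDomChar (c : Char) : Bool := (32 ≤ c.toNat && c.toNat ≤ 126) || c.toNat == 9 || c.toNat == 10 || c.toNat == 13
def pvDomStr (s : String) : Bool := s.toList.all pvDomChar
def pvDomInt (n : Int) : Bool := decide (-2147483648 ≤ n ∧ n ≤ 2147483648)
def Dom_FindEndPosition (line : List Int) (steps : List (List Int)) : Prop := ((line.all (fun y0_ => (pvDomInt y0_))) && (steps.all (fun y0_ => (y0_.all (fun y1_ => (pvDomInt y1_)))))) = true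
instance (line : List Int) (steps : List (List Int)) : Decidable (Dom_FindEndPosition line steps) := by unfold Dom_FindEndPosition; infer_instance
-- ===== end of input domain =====

-- B builds all finite-difference levels first, then fills steps in two passes;
-- both versions mutate the shared `steps` object in Python, and the equivalence
-- proved here is about the returned value (which is that object's final content).

-- steps[i].extend(xs) / steps[i].append(x): append xs to the i-th list (the mutation primitive both versions use)
def appendAt (steps : List (List Int)) (i : Nat) (xs : List Int) : List (List Int) :=
  match steps, i with
  | [], _ => []
  | s :: rest, 0 => (s ++ xs) :: rest
  | s :: rest, n + 1 => s :: appendAt rest n xs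

-- new_line[i] = line[i+1] - line[i]
def pdiff (line : List Int) : List Int := List.zipWith (fun a b => a - b) line.tail line

theorem pdiff_length (line : List Int) : (pdiff line).length = line.length - 1 := by
  simp [pdiff]

-- ===== PORT A =====
def FindEndPosition (line : List Int) (steps : List (List Int)) : List (List Int) :=
  if line = [] then steps  -- Python raises IndexError on line[-1] here; excluded by Pre_
  else
    let s1 := appendAt steps 0 [line.getLastD 0]   -- steps[0].append(line[-1])
    let s2 := appendAt s1 1 [line.headI]           -- steps[1].append(line[0])
    if line.all (fun x => x == 0) then s2          -- the break-early scan for all_zeros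
    else FindEndPosition (pdiff line) s2
termination_by line.length
decreasing_by
  rename_i h _
  have := pdiff_length line
  have : line.length ≠ 0 := by simpa using (List.length_pos_iff.mpr h).ne'
  omega

-- ===== PORT B =====
def buildLevels (line : List Int) : List (List Int) :=
  if line.any (fun x => x != 0) then line :: buildLevels (pdiff line)
  else [line]
termination_by line.length
decreasing_by
  rename_i h
  have hne : line ≠ [] := by rintro rfl; simp at h
  have := pdiff_length line
  have : line.length ≠ 0 := by simpa using (List.length_pos_iff.mpr hne).ne'
  omega

def FindEndPosition_alt (line : List Int) (steps : List (List Int)) : List (List Int) :=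
  let levels := buildLevels line
  let s1 := appendAt steps 0 (levels.map (fun lvl => lvl.getLastD 0))  -- steps[0].extend(lvl[-1] …)
  let s2 := appendAt s1 1 (levels.map (fun lvl => lvl.headI))          -- steps[1].extend(lvl[0] …)
  s2

-- ===== PRECONDITION & SPEC =====
-- Exactly the inputs on which Python A returns: steps has the two lists it indexes,
-- line is nonempty and some finite-difference level of it is all zero (otherwise the
-- recursion reaches the empty level and line[-1] raises IndexError).
def Pre_FindEndPosition (line : List Int) (steps : List (List Int)) : Prop :=
  line ≠ [] ∧ 2 ≤ steps.length ∧ ∃ k < line.length, ∀ x ∈ pdiff^[k] line, x = 0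
instance (line : List Int) (steps : List (List Int)) : Decidable (Pre_FindEndPosition line steps) := by unfold Pre_FindEndPosition; infer_instance

def pvWitness_FindEndPosition : List Int × List (List Int) := ([1, 3, 5], [[7], []])

def Spec_FindEndPosition (line : List Int) (steps : List (List Int)) (out : List (List Int)) : Prop := out = FindEndPosition_alt line steps
instance (line : List Int) (steps : List (List Int)) (out : List (List Int)) : Decidable (Spec_FindEndPosition line steps out) := by unfold Spec_FindEndPosition; infer_instance

-- ===== CLAIM (what is proved, stated in full; the proofs are below) =====
def Claim_equal_FindEndPosition : Prop := ∀ (line : List Int) (steps : List (List Int)), Dom_FindEndPosition line steps → Pre_FindEndPosition line steps → Spec_FindEndPosition line steps (FindEndPosition line steps)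

-- ===== LEMMAS AND PROOFS =====

theorem appendAt_appendAt_same (s : List (List Int)) (i : Nat) (xs ys : List Int) :
    appendAt (appendAt s i xs) i ys = appendAt s i (xs ++ ys) := by
  induction s generalizing i with
  | nil => simp [appendAt]
  | cons a t ih =>
    cases i with
    | zero => simp [appendAt]
    | succ n => simp [appendAt, ih]

theorem appendAt_comm01 (s : List (List Int)) (xs ys : List Int) :
    appendAt (appendAt s 0 xs) 1 ys = appendAt (appendAt s 1 ys) 0 xs := by
  match s with
  | [] => simp [appendAt]
  | [a] => simp [appendAt]
  | a :: b :: t => simp [appendAt]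

theorem key (n : Nat) : ∀ (line : List Int) (steps : List (List Int)),
    line.length ≤ n → line ≠ [] → (∃ k < line.length, ∀ x ∈ pdiff^[k] line, x = 0) →
    FindEndPosition line steps = FindEndPosition_alt line steps := by
  induction n with
  | zero =>
    intro line steps hlen hne _
    exact absurd (List.length_eq_zero_iff.mp (Nat.le_zero.mp hlen)) hne
  | succ n ih =>
    intro line steps hlen hne hpre
    by_cases hz : line.all (fun x => x == 0)
    · -- all-zero level: both stop here
      have hany : line.any (fun x => x != 0) = false := by
        simp only [List.all_eq_true] at hz
        simp [List.any_eq_false]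
        intro x hx; simpa using hz x hx
      rw [FindEndPosition, if_neg hne]
      rw [FindEndPosition_alt, buildLevels, hany]
      simp [hz]
    · -- recurse on the difference level
      have hzb : (line.all (fun x => x == 0)) = false := by
        cases h : line.all (fun x => x == 0) <;> simp_all
      have hany : line.any (fun x => x != 0) = true := by
        simp only [List.all_eq_true, not_forall] at hz
        obtain ⟨x, hx, hxne⟩ := hz
        simp only [List.any_eq_true]
        exact ⟨x, hx, by simpa using hxne⟩
      obtain ⟨k, hk, hkz⟩ := hpre
      have hk1 : k ≠ 0 := by
        rintro rfl
        simp only [Function.iterate_zero, id] at hkz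
        have : line.all (fun x => x == 0) = true := by
          rw [List.all_eq_true]; intro x hx; simpa using hkz x hx
        rw [this] at hzb; simp at hzb
      obtain ⟨k', rfl⟩ := Nat.exists_eq_succ_of_ne_zero hk1
      have hlen2 : 2 ≤ line.length := by omega
      have hdne : pdiff line ≠ [] := by
        have := pdiff_length line
        intro h; rw [h] at this; simp at this; omega
      have hpre' : ∃ k < (pdiff line).length, ∀ x ∈ pdiff^[k] (pdiff line), x = 0 := by
        refine ⟨k', ?_, ?_⟩
        · have := pdiff_length line; omega
        · intro x hx
          exact hkz x (by rwa [Function.iterate_succ_apply])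
      have hlen' : (pdiff line).length ≤ n := by
        have := pdiff_length line; omega
      have hbl : buildLevels line = line :: buildLevels (pdiff line) := by
        rw [buildLevels, if_pos hany]
      rw [FindEndPosition, if_neg hne, hzb]
      simp only [Bool.false_eq_true, if_false]
      rw [ih _ _ hlen' hdne hpre']
      rw [FindEndPosition_alt, FindEndPosition_alt, hbl]
      simp only [List.map_cons]
      rw [appendAt_comm01, appendAt_appendAt_same, appendAt_comm01, appendAt_appendAt_same]
      exact (appendAt_comm01 _ _ _).symm

-- ===== VERDICT (by name: the statement is the Claim_ definition above) =====
theorem FindEndPosition_spec : Claim_equal_FindEndPosition := by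
  intro line steps _ hpre
  unfold Spec_FindEndPosition
  exact key line.length line steps le_rfl hpre.1 hpre.2.2
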